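-- pv_equiv track=rewrite | github.com/KIRUBAKARAN9840/tele-gym-type-back | app/fittbot_api/v1/client/client_api/chatbot/codes/food_template.py | has_custom_day_names
-- ===== SOURCE A (Python) =====
-- def has_custom_day_names(meal_plan: dict):
--     """Check if meal plan contains custom day names (not standard Monday-Sunday)"""
--     standard_keys = {'monday', 'tuesday', 'wednesday', 'thursday', 'friday', 'saturday', 'sunday'}
--     actual_keys = {key.lower().replace('_', ' ').replace(' ', '') for key in meal_plan.keys()}
--
--     # Check if any key doesn't match standard day names
--     for key in meal_plan.keys():
--         normalized_key = key.lower().replace('_', '').replace(' ', '')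
--         if normalized_key not in standard_keys:
--             return True
--     return False
-- ===== SOURCE B (Python) =====
-- def has_custom_day_names(meal_plan: dict):
--     """Check if meal plan contains custom day names (not standard Monday-Sunday)"""
--     days = ('monday', 'tuesday', 'wednesday', 'thursday', 'friday', 'saturday', 'sunday')
--
--     def is_standard(key):
--         # Multi-pattern match: scan the key character by character (case-folded,
--         # skipping '_' and ' '), narrowing the set of candidate day-word suffixes.
--         candidates = list(days)
--         for ch in key.lower():
--             if ch == '_' or ch == ' ':
--                 continue
--             candidates = [w[1:] for w in candidates if w[:1] == ch]
--             if not candidates: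
--                 return False
--         return '' in candidates
--
--     return not all(is_standard(key) for key in meal_plan)
-- ===== Notes on version B (the rewrite author's own statement) =====
-- stated objective: alternative
-- what changed: Instead of building a normalized copy of each key and testing it against a set, B recognizes standard day names with a multi-pattern matcher: it scans each key character by character (case-folding and skipping '_' and ' ' on the fly) while narrowing a list of candidate day-word suffixes, accepting iff a candidate is exhausted exactly at the end; the top level then negates all().
import Mathlib
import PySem

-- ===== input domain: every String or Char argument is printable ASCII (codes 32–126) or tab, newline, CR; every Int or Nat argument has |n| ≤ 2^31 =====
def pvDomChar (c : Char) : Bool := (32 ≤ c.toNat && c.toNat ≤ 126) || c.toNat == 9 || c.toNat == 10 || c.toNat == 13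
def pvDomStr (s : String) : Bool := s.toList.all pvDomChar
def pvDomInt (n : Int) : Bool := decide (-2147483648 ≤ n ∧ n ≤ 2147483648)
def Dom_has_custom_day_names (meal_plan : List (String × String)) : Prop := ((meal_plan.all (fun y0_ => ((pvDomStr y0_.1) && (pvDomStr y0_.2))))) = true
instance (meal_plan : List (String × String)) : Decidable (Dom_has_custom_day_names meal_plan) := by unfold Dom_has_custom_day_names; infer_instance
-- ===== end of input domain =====

-- B replaces A's normalize-then-set-membership check by a multi-pattern matcher that scans each
-- key character by character, narrowing a list of candidate day-word suffixes (objective: alternative).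

-- ===== PORT A =====
def pvStdKeys : PySem.Set String :=
  PySem.Set.ofList ["monday", "tuesday", "wednesday", "thursday", "friday", "saturday", "sunday"]

def pvNorm (key : String) : String :=
  PySem.Str.replace (PySem.Str.replace (PySem.Str.lower key) "_" "") " " ""

-- the for-loop with early 'return True', as structural recursion over the dict's keys
def pvLoopA : List String → Bool
  | [] => false
  | key :: rest =>
      if pvStdKeys.contains (pvNorm key) = false then true else pvLoopA rest

def has_custom_day_names (meal_plan : List (String × String)) : Bool :=
  -- A also builds 'actual_keys', a set it never reads (dead code); the result is pvLoopA over the keys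
  pvLoopA (meal_plan.map Prod.fst)

-- ===== PORT B =====
def pvDays : List (List Char) :=
  ["monday".toList, "tuesday".toList, "wednesday".toList, "thursday".toList,
   "friday".toList, "saturday".toList, "sunday".toList]

-- the 'for ch in key.lower()' loop of is_standard: narrow the candidate suffixes per character
def pvScanB : List Char → List (List Char) → Bool
  | [], cands => cands.contains ([] : List Char)
  | ch :: rest, cands =>
      if ch = '_' ∨ ch = ' ' then pvScanB rest cands
      else
        let cands' := (cands.filter (fun w => w.head? == some ch)).map (List.drop 1)
        if cands'.isEmpty then false else pvScanB rest cands'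

def pvIsStandard (key : String) : Bool :=
  pvScanB (PySem.Str.lower key).toList pvDays

def has_custom_day_names_alt (meal_plan : List (String × String)) : Bool :=
  !(meal_plan.all (fun kv => pvIsStandard kv.1))

-- ===== PRECONDITION & SPEC =====
def Spec_has_custom_day_names (meal_plan : List (String × String)) (out : Bool) : Prop := out = has_custom_day_names_alt meal_plan
instance (meal_plan : List (String × String)) (out : Bool) : Decidable (Spec_has_custom_day_names meal_plan out) := by unfold Spec_has_custom_day_names; infer_instance

-- ===== CLAIM (what is proved, stated in full; the proofs are below) =====
def Claim_equal_has_custom_day_names : Prop := ∀ (meal_plan : List (String × String)), Dom_has_custom_day_names meal_plan → Spec_has_custom_day_names meal_plan (has_custom_day_names meal_plan)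

-- ===== LEMMAS AND PROOFS =====

-- removing every occurrence of one character is a filter
def pvStrip (cs : List Char) : List Char :=
  cs.filter (fun ch => !(ch == '_' || ch == ' '))

theorem pvReplaceGo_filter (c : Char) (l : List Char) :
    ∀ (fuel : Nat) (acc : List Char), l.length ≤ fuel →
      PySem.Chars.replace.go [c] [] fuel l acc
        = acc.reverse ++ l.filter (fun x => !(x == c)) := by
  induction l with
  | nil =>
      intro fuel acc _
      cases fuel <;> simp [PySem.Chars.replace.go]
  | cons x t ih =>
      intro fuel acc hle
      cases fuel with
      | zero => simp at hle
      | succ fuel =>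
        by_cases hx : x = c
        · subst hx
          have hpre : List.isPrefixOf [x] (x :: t) = true := by
            simp [List.isPrefixOf]
          rw [PySem.Chars.replace.go]
          simp only [hpre, if_true]
          have : List.drop (List.length [x]) (x :: t) = t := by simp
          rw [this, ih fuel _ (by simpa using Nat.le_of_succ_le_succ hle)]
          simp
        · have hpre : List.isPrefixOf [c] (x :: t) = false := by
            simp [List.isPrefixOf]
            intro h; exact absurd h.symm hx
          rw [PySem.Chars.replace.go]
          simp only [hpre]
          rw [if_neg (by simp), ih fuel _ (by simpa using Nat.le_of_succ_le_succ hle)]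
          simp [hx]
  
theorem pvReplace_filter (c : Char) (cs : List Char) :
    PySem.Chars.replace cs [c] [] = cs.filter (fun x => !(x == c)) := by
  rw [PySem.Chars.replace]
  simp only [List.isEmpty_cons, Bool.false_eq_true, if_false]
  simpa using pvReplaceGo_filter c cs cs.length [] le_rfl

theorem pvNorm_toList (key : String) :
    (pvNorm key).toList = pvStrip (PySem.Str.lower key).toList := by
  unfold pvNorm pvStrip
  rw [PySem.Str.toList_replace, PySem.Str.toList_replace]
  have h1 : ("_" : String).toList = ['_'] := rfl
  have h2 : (" " : String).toList = [' '] := rfl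
  have h3 : ("" : String).toList = [] := rfl
  rw [h1, h2, h3, pvReplace_filter, pvReplace_filter, List.filter_filter]
  apply List.filter_congr
  intro x _
  cases h4 : (x == '_') <;> cases h5 : (x == ' ') <;> simp_all

-- narrowing the candidate list by one character tracks list membership of cons
theorem pvBeq_toList (s t : String) : (s == t) = (s.toList == t.toList) := by
  by_cases h : s = t
  · subst h; simp
  · have h' : ¬ s.toList = t.toList := fun e => h (String.toList_inj.mp e)
    simp [h, h']

theorem pvContains_cons (cands : List (List Char)) (ch : Char) (l : List Char) :
    cands.contains (ch :: l)
      = ((cands.filter (fun w => w.head? == some ch)).map (List.drop 1)).contains l := by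
  induction cands with
  | nil => rfl
  | cons w rest ih =>
      cases w with
      | nil => simpa using ih
      | cons c t =>
          by_cases hc : c = ch
          · subst hc
            have hf : List.filter (fun w => w.head? == some c) ((c :: t) :: rest)
                = (c :: t) :: List.filter (fun w => w.head? == some c) rest := by
              simp
            rw [hf, List.map_cons, List.contains_cons, List.contains_cons, ih]
            simp [List.cons_beq_cons]
          · have hf : List.filter (fun w => w.head? == some ch) ((c :: t) :: rest)
                = List.filter (fun w => w.head? == some ch) rest := by
              simp [hc]
            rw [hf, List.contains_cons, ih]
            have hne : ((ch :: l) == (c :: t)) = false := by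
              simp [List.cons_beq_cons, Ne.symm hc]
            rw [hne, Bool.false_or]

-- the scan computes membership of the stripped character list among the candidates
theorem pvScanB_eq (cs : List Char) : ∀ (cands : List (List Char)),
    pvScanB cs cands = cands.contains (pvStrip cs) := by
  induction cs with
  | nil => intro cands; simp [pvScanB, pvStrip]
  | cons ch rest ih =>
      intro cands
      by_cases hskip : ch = '_' ∨ ch = ' '
      · rw [pvScanB]
        rw [if_pos hskip, ih]
        have : pvStrip (ch :: rest) = pvStrip rest := by
          unfold pvStrip
          rcases hskip with h | h <;> subst h <;> simp
        rw [this]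
      · rw [pvScanB]
        rw [if_neg hskip]
        have hs : pvStrip (ch :: rest) = ch :: pvStrip rest := by
          unfold pvStrip
          push Not at hskip
          simp [hskip.1, hskip.2]
        rw [hs, pvContains_cons]
        by_cases he : ((cands.filter (fun w => w.head? == some ch)).map (List.drop 1)).isEmpty
        · simp only [he, if_true]
          rw [List.isEmpty_iff] at he
          rw [he]; rfl
        · simp only [he, Bool.false_eq_true, if_false]
          exact ih _

-- string membership among the seven standard names, moved to the character-list side
theorem pvContains_std (s : String) :
    pvStdKeys.contains s = pvDays.contains s.toList := by
  have h : pvStdKeys = (["monday", "tuesday", "wednesday", "thursday", "friday", "saturday", "sunday"] : List String) := by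
    have hnd : (["monday", "tuesday", "wednesday", "thursday", "friday", "saturday", "sunday"] : List String).Nodup := by decide
    unfold pvStdKeys
    exact PySem.Set.ofList_eq_self_of_nodup _ hnd
  rw [h]
  unfold pvDays PySem.Set.contains
  simp only [List.contains_cons, List.contains_nil, pvBeq_toList]

-- per key, A's membership test and B's scan agree
theorem pvKey_eq (key : String) :
    pvStdKeys.contains (pvNorm key) = pvIsStandard key := by
  rw [pvContains_std, pvNorm_toList, pvIsStandard, pvScanB_eq]

theorem pvLoopA_eq (ks : List String) :
    pvLoopA ks = !(ks.all (fun k => pvIsStandard k)) := by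
  induction ks with
  | nil => rfl
  | cons k rest ih =>
      rw [pvLoopA, List.all_cons]
      by_cases h : pvStdKeys.contains (pvNorm k) = false
      · have hk : pvIsStandard k = false := by rw [← pvKey_eq k]; exact h
        rw [if_pos h, hk]
        simp
      · rw [Bool.not_eq_false] at h
        have hk : pvIsStandard k = true := by rw [← pvKey_eq k]; exact h
        rw [if_neg (by rw [h]; simp), ih, hk, Bool.true_and]

-- ===== VERDICT (by name: the statement is the Claim_ definition above) =====
theorem has_custom_day_names_spec : Claim_equal_has_custom_day_names := by
  intro meal_plan _
  unfold Spec_has_custom_day_names has_custom_day_names has_custom_day_names_alt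
  rw [pvLoopA_eq]
  congr 1
  rw [List.all_map]
  rfl
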